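-- pv_equiv track=rewrite | github.com/johnny-ggao/nofn | src/trading/graph/state.py | _merge_signals
-- ===== SOURCE A (Python) =====
-- from typing import Any, Dict, List, Optional, Tuple, TypedDict, Annotated
--
-- def _merge_signals(
--     existing: Dict[str, str],
--     new: Dict[str, str],
-- ) -> Dict[str, str]:
--     """合并待观察信号。
--
--     新的信号会覆盖旧的，value 为空字符串表示删除。
--     """
--     result = dict(existing)
--     for k, v in new.items():
--         if v:
--             result[k] = v
--         else:
--             result.pop(k, None)
--     return result
-- ===== SOURCE B (Python) =====
-- def _merge_signals(existing, new):
--     """Merge watch signals: build the full union, then drop keys that `new` deletes."""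
--     merged = {**existing, **new}
--     return {k: v for k, v in merged.items() if v or k not in new}
-- ===== Notes on version B (the rewrite author's own statement) =====
-- stated objective: simpler
-- what changed: Replaces the copy-then-mutate loop (insert/pop per item of new) by building the full union {**existing, **new} in one operation and filtering its items once, keeping entries whose value is truthy or whose key is not in new.
import Mathlib
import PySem

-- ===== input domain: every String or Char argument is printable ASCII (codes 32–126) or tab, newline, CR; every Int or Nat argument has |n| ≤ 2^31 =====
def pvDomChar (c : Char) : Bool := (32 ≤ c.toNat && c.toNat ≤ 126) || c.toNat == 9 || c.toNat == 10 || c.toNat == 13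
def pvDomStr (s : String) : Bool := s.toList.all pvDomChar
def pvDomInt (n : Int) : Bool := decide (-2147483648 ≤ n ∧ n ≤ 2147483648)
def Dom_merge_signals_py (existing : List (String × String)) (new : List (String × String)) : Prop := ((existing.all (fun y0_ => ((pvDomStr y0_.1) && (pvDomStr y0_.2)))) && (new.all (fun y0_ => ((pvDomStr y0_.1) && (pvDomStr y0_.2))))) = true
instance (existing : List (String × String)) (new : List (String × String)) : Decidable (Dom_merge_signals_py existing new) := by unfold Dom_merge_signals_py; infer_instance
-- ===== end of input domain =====

-- B builds the union {**existing, **new} in one step and then filters its items once,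
-- instead of A's copy-then-mutate loop; objective: simpler.

-- ===== PORT A =====
-- result = dict(existing); for k, v in new.items(): if v: result[k] = v else: result.pop(k, None)
def merge_signals_py (existing : List (String × String)) (new : List (String × String)) : List (String × String) :=
  let dNew := PySem.Dict.ofList new
  let result := dNew.items.foldl
    (fun r kv => if kv.2 ≠ "" then r.insert kv.1 kv.2 else r.erase kv.1)
    (PySem.Dict.ofList existing)
  result.items

-- ===== PORT B =====
-- merged = {**existing, **new}; {k: v for k, v in merged.items() if v or k not in new}
def merge_signals_py_alt (existing : List (String × String)) (new : List (String × String)) : List (String × String) :=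
  let dNew := PySem.Dict.ofList new
  let merged := (PySem.Dict.ofList existing).update dNew.items
  merged.items.filter (fun kv => !(kv.2 == "") || !(dNew.contains kv.1))

-- ===== PRECONDITION & SPEC =====
def Spec_merge_signals_py (existing : List (String × String)) (new : List (String × String)) (out : List (String × String)) : Prop := out = merge_signals_py_alt existing new
instance (existing : List (String × String)) (new : List (String × String)) (out : List (String × String)) : Decidable (Spec_merge_signals_py existing new out) := by unfold Spec_merge_signals_py; infer_instance

-- ===== CLAIM (what is proved, stated in full; the proofs are below) =====
def Claim_equal_merge_signals_py : Prop := ∀ (existing : List (String × String)) (new : List (String × String)), Dom_merge_signals_py existing new → Spec_merge_signals_py existing new (merge_signals_py existing new)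

-- ===== LEMMAS AND PROOFS =====

-- keys of an erase stay Nodup
lemma pv_nodup_keys_erase (d : PySem.Dict String String) (k : String)
    (h : d.keys.Nodup) : (d.erase k).keys.Nodup := by
  simp only [PySem.Dict.keys, PySem.Dict.erase] at *
  exact ((List.filter_sublist).map Prod.fst).nodup h

-- contains after erase, other key
lemma pv_contains_erase_of_ne (d : PySem.Dict String String) (k a : String) (hne : a ≠ k) :
    (d.erase k).contains a = d.contains a := by
  simp only [PySem.Dict.contains, PySem.Dict.erase, List.any_filter]
  congr 1
  funext p
  by_cases hp : p.1 = a
  · simp [hp, hne]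
  · simp [hp]

-- erase (other key) commutes with insert
lemma pv_erase_insert_of_ne (d : PySem.Dict String String) (k a : String) (b : String)
    (hne : a ≠ k) : (d.insert a b).erase k = (d.erase k).insert a b := by
  apply PySem.Dict.ext
  simp only [PySem.Dict.insert, pv_contains_erase_of_ne d k a hne]
  by_cases hc : d.contains a = true
  · simp only [hc, if_true, PySem.Dict.erase, List.filter_map]
    congr 1
    apply List.filter_congr
    intro p _
    by_cases hp : p.1 = a
    · simp [Function.comp, hp]
    · simp [Function.comp, hp]
  · simp [hc, PySem.Dict.erase, List.filter_append, hne]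

-- erase of a just-inserted key
lemma pv_erase_insert_self (d : PySem.Dict String String) (k : String) (v : String) :
    (d.insert k v).erase k = d.erase k := by
  apply PySem.Dict.ext
  simp only [PySem.Dict.insert]
  by_cases hc : d.contains k = true
  · simp only [hc, if_true, PySem.Dict.erase, List.filter_map]
    rw [show ((fun p : String × String => !p.1 == k) ∘ fun p : String × String =>
          if (p.1 == k) = true then (k, v) else p)
        = (fun p : String × String => !p.1 == k) by
      funext p; by_cases hp : p.1 = k <;> simp [Function.comp, hp]]
    refine (List.map_congr_left ?_).trans (List.map_id _)
    intro p hp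
    have hpk : ¬ p.1 = k := by simpa using (List.of_mem_filter hp)
    simp [hpk]
  · simp [hc, PySem.Dict.erase, List.filter_append]

-- folding inserts over keys avoiding k commutes with erase k
lemma pv_erase_foldl_insert (l : List (String × String)) (d : PySem.Dict String String)
    (k : String) (hk : k ∉ l.map Prod.fst) :
    (l.foldl (fun r kv => r.insert kv.1 kv.2) d).erase k
      = l.foldl (fun r kv => r.insert kv.1 kv.2) (d.erase k) := by
  induction l generalizing d with
  | nil => rfl
  | cons p t ih =>
    simp only [List.map_cons, List.mem_cons, not_or] at hk
    simp only [List.foldl_cons]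
    rw [ih (d.insert p.1 p.2) hk.2, pv_erase_insert_of_ne d k p.1 p.2 (fun h => hk.1 h.symm)]

-- a fold of inserts over keys avoiding k does not change get? k
lemma pv_get?_foldl_insert (l : List (String × String)) (d : PySem.Dict String String)
    (k : String) (hk : k ∉ l.map Prod.fst) :
    (l.foldl (fun r kv => r.insert kv.1 kv.2) d).get? k = d.get? k := by
  induction l generalizing d with
  | nil => rfl
  | cons p t ih =>
    simp only [List.map_cons, List.mem_cons, not_or] at hk
    simp only [List.foldl_cons]
    rw [ih (d.insert p.1 p.2) hk.2, PySem.Dict.get?_insert_of_ne _ _ (fun h => hk.1 h)]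

-- MAIN: A's insert/erase loop equals the insert-only union followed by one filter
lemma pv_main (l : List (String × String)) (d : PySem.Dict String String)
    (hd : d.keys.Nodup) (hl : (l.map Prod.fst).Nodup) :
    (l.foldl (fun r kv => if kv.2 ≠ "" then r.insert kv.1 kv.2 else r.erase kv.1) d).items
      = (l.foldl (fun r kv => r.insert kv.1 kv.2) d).items.filter
          (fun kv => !(kv.2 == "") || !(decide (kv.1 ∈ l.map Prod.fst))) := by
  induction l generalizing d with
  | nil => simp
  | cons p t ih =>
    obtain ⟨k, v⟩ := p
    simp only [List.map_cons, List.nodup_cons] at hl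
    obtain ⟨hk, ht⟩ := hl
    simp only [List.foldl_cons]
    by_cases hv : v = ""
    · subst hv
      rw [if_neg (by simp)]
      rw [ih (d.erase k) (pv_nodup_keys_erase d k hd) ht]
      rw [show (t.foldl (fun r kv => r.insert kv.1 kv.2) (d.erase k))
            = (t.foldl (fun r kv => r.insert kv.1 kv.2) (d.insert k "")).erase k by
        rw [pv_erase_foldl_insert t (d.insert k "") k hk, pv_erase_insert_self]]
      have hXn : (t.foldl (fun r kv => r.insert kv.1 kv.2) (d.insert k "")).keys.Nodup :=
        PySem.Dict.nodup_keys_foldl_insert_key t Prod.fst (fun _ kv => kv.2) _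
          (PySem.Dict.nodup_keys_insert d k "" hd)
      have hXg : (t.foldl (fun r kv => r.insert kv.1 kv.2) (d.insert k "")).get? k = some "" := by
        rw [pv_get?_foldl_insert t _ k hk, PySem.Dict.get?_insert_self]
      simp only [PySem.Dict.erase, List.filter_filter]
      simp only [List.map_cons]
      apply List.filter_congr
      intro kv hkv
      by_cases hkk : kv.1 = k
      · have : kv.2 = "" := by
          have h1 : (t.foldl (fun r kv => r.insert kv.1 kv.2) (d.insert k "")).get? kv.1
              = some kv.2 := PySem.Dict.get?_of_mem_items _ (by exact hkv) hXn
          rw [hkk] at h1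
          rw [hXg] at h1
          exact (Option.some.inj h1).symm
        simp [hkk, this]
      · have h1 : (kv.1 == k) = false := by simp [hkk]
        have h2 : (kv.1 ∈ k :: List.map Prod.fst t) ↔ (kv.1 ∈ List.map Prod.fst t) := by
          simp [List.mem_cons, hkk]
        simp only [h2, h1]
        simp
    · rw [if_pos (by simpa using hv)]
      rw [ih (d.insert k v) (PySem.Dict.nodup_keys_insert d k v hd) ht]
      have hXn : (t.foldl (fun r kv => r.insert kv.1 kv.2) (d.insert k v)).keys.Nodup :=
        PySem.Dict.nodup_keys_foldl_insert_key t Prod.fst (fun _ kv => kv.2) _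
          (PySem.Dict.nodup_keys_insert d k v hd)
      have hXg : (t.foldl (fun r kv => r.insert kv.1 kv.2) (d.insert k v)).get? k = some v := by
        rw [pv_get?_foldl_insert t _ k hk, PySem.Dict.get?_insert_self]
      simp only [List.map_cons]
      apply List.filter_congr
      intro kv hkv
      by_cases hkk : kv.1 = k
      · have : kv.2 = v := by
          have h1 : (t.foldl (fun r kv => r.insert kv.1 kv.2) (d.insert k v)).get? kv.1
              = some kv.2 := PySem.Dict.get?_of_mem_items _ (by exact hkv) hXn
          rw [hkk] at h1
          rw [hXg] at h1
          exact (Option.some.inj h1).symm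
        simp [hkk, this, hv]
      · have h2 : (kv.1 ∈ k :: List.map Prod.fst t) ↔ (kv.1 ∈ List.map Prod.fst t) := by
          simp [List.mem_cons, hkk]
        simp only [h2]

-- ===== VERDICT (by name: the statement is the Claim_ definition above) =====
theorem merge_signals_py_spec : Claim_equal_merge_signals_py := by
  intro existing new _
  unfold Spec_merge_signals_py merge_signals_py merge_signals_py_alt
  have hl : ((PySem.Dict.ofList new).items.map Prod.fst).Nodup := by
    have := PySem.Dict.nodup_keys_ofList (κ := String) (ν := String) new
    simpa [PySem.Dict.keys] using this
  rw [pv_main _ _ (by simpa [PySem.Dict.keys] using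
        PySem.Dict.nodup_keys_ofList (κ := String) (ν := String) existing) hl]
  simp only [PySem.Dict.update]
  apply List.filter_congr
  intro kv _
  rw [PySem.Dict.contains_eq_decide_mem_keys]
  rfl
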